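-- pv_equiv track=rewrite | github.com/PedroHNeves1505/Calculadora_do_Programador | funcoes.py | quartenario_decimal
-- ===== SOURCE A (Python) =====
-- def quartenario_decimal(valor):
-- 	valor = str(valor)[::-1]
-- 	num_decimal = 0
-- 	for i in range(len(valor)):
-- 		unidade_quartenaria = int(valor[i])
-- 		valor_decimal = int(unidade_quartenaria) * 4**i
-- 		num_decimal = num_decimal + valor_decimal
-- 	return num_decimal
-- ===== SOURCE B (Python) =====
-- def quartenario_decimal(valor):
--     num_decimal = 0
--     for d in str(valor):
--         num_decimal = num_decimal * 4 + int(d)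
--     return num_decimal
-- ===== Notes on version B (the rewrite author's own statement) =====
-- stated objective: idiomatic
-- what changed: Horner's method: a single forward multiply-accumulate pass (acc = acc*4 + digit) over str(valor), instead of reversing the string and summing digit * 4**i with an exponentiation per digit.
import Mathlib
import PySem

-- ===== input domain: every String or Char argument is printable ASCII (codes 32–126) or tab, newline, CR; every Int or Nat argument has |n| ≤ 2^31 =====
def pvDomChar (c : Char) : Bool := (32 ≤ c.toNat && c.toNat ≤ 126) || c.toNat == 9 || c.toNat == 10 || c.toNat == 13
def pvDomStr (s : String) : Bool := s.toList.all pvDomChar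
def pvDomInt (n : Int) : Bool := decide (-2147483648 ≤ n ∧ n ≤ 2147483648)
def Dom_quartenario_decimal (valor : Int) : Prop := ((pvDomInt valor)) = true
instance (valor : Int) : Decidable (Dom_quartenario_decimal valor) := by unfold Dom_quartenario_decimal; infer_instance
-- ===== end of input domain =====

-- B replaces A's reverse-and-sum-with-4**i loop by a forward Horner multiply-accumulate pass.

-- int(c) for a single character c: exact on digit characters '0'..'9'; on other characters
-- Python raises ValueError, which Pre_ excludes (the only non-digit str(valor) can contain is '-').
def pvDigit (c : Char) : Int := (c.toNat : Int) - 48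

-- ===== PORT A =====
-- valor = str(valor)[::-1]; for i in range(len(valor)): num += int(valor[i]) * 4**i
-- (valor[i] with 0 ≤ i < len never raises, so getD is exact here)
def quartenario_decimal (valor : Int) : Int :=
  let s := (PySem.Int.toChars valor).reverse
  (List.range s.length).foldl (fun num_decimal i => num_decimal + pvDigit (s.getD i ' ') * 4 ^ i) 0

-- ===== PORT B =====
-- for d in str(valor): num_decimal = num_decimal * 4 + int(d)
def quartenario_decimal_alt (valor : Int) : Int :=
  (PySem.Int.toChars valor).foldl (fun num_decimal c => num_decimal * 4 + pvDigit c) 0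

-- ===== PRECONDITION & SPEC =====
-- Python A raises ValueError on negative valor: str(valor) then starts with '-', and int('-') fails.
def Pre_quartenario_decimal (valor : Int) : Prop := 0 ≤ valor
instance (valor : Int) : Decidable (Pre_quartenario_decimal valor) := by unfold Pre_quartenario_decimal; infer_instance
def pvWitness_quartenario_decimal : Int := (123)

def Spec_quartenario_decimal (valor : Int) (out : Int) : Prop := out = quartenario_decimal_alt valor
instance (valor : Int) (out : Int) : Decidable (Spec_quartenario_decimal valor out) := by unfold Spec_quartenario_decimal; infer_instance

-- ===== CLAIM (what is proved, stated in full; the proofs are below) =====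
def Claim_equal_quartenario_decimal : Prop := ∀ (valor : Int), Dom_quartenario_decimal valor → Pre_quartenario_decimal valor → Spec_quartenario_decimal valor (quartenario_decimal valor)

-- ===== LEMMAS AND PROOFS =====

-- A's loop body as a function of the (already reversed) character list
def pvSumPow (r : List Char) : Int :=
  (List.range r.length).foldl (fun num_decimal i => num_decimal + pvDigit (r.getD i ' ') * 4 ^ i) 0

theorem pvSumPow_foldl_shift (r : List Char) (c : Char) :
    ∀ (n : Nat) (a : Int),
      (List.range n).foldl (fun acc i => acc + pvDigit ((r ++ [c]).getD i ' ') * 4 ^ i) a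
        = (List.range n).foldl (fun acc i => acc + pvDigit (r.getD i ' ') * 4 ^ i) a
        ∨ ¬ n ≤ r.length := by
  intro n a
  by_cases h : n ≤ r.length
  · left
    apply PySem.List.foldl_congr_mem
    intro acc i hi
    have hi' : i < r.length := lt_of_lt_of_le (List.mem_range.mp hi) h
    rw [List.getD_append _ _ _ _ hi']
  · right; exact h

theorem pvSumPow_append (r : List Char) (c : Char) :
    pvSumPow (r ++ [c]) = pvSumPow r + pvDigit c * 4 ^ r.length := by
  unfold pvSumPow
  rw [List.length_append, List.length_singleton, List.range_succ, List.foldl_append]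
  have h := pvSumPow_foldl_shift r c r.length 0
  rcases h with h | h
  · rw [h]
    simp
  · exact absurd le_rfl h

theorem pvHorner_shift (l : List Char) :
    ∀ (a : Int),
      l.foldl (fun acc c => acc * 4 + pvDigit c) a
        = a * 4 ^ l.length + l.foldl (fun acc c => acc * 4 + pvDigit c) 0 := by
  induction l with
  | nil => intro a; simp
  | cons c t ih =>
    intro a
    simp only [List.foldl_cons, List.length_cons]
    rw [ih (a * 4 + pvDigit c), ih (0 * 4 + pvDigit c)]
    ring

theorem pvHorner_eq_sumPow (l : List Char) :
    l.foldl (fun acc c => acc * 4 + pvDigit c) 0 = pvSumPow l.reverse := by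
  induction l with
  | nil => simp [pvSumPow]
  | cons c t ih =>
    simp only [List.foldl_cons, List.reverse_cons]
    rw [pvHorner_shift t (0 * 4 + pvDigit c), ih, pvSumPow_append]
    simp [List.length_reverse]
    ring

-- ===== VERDICT (by name: the statement is the Claim_ definition above) =====
theorem quartenario_decimal_spec : Claim_equal_quartenario_decimal := by
  intro valor _ _
  unfold Spec_quartenario_decimal quartenario_decimal quartenario_decimal_alt
  rw [pvHorner_eq_sumPow]
  rfl
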